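-- pv_equiv track=rewrite | github.com/Corncycle/leetcode-solutions | valid-sudoku.py | checkRegion
-- ===== SOURCE A (Python) =====
-- from typing import List
--
-- def checkRegion(board: List[List[str]], startX: int, startY: int, spanX: int, spanY: int) -> bool:
--     numbersSeen = 0
--     distinctNums = set()
--     for i in range(startY, startY + spanY):
--         for j in range(startX, startX + spanX):
--             if board[i][j] != ".":
--                 numbersSeen += 1
--                 distinctNums.add(board[i][j])
--     return numbersSeen == len(distinctNums)
-- ===== SOURCE B (Python) =====
-- def checkRegion(board, startX, startY, spanX, spanY):
--     vals = []
--     i, rows = startY, spanY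
--     while rows > 0:
--         j, cols = startX, spanX
--         while cols > 0:
--             v = board[i][j]
--             if v != ".":
--                 vals.append(v)
--             j += 1
--             cols -= 1
--         i += 1
--         rows -= 1
--     prev = None
--     for v in sorted(vals):
--         if v == prev:
--             return False
--         prev = v
--     return True
-- ===== Notes on version B (the rewrite author's own statement) =====
-- stated objective: alternative
-- what changed: A's for-range loops with a counter plus a hash set (count == set size) are replaced by while-loops with explicit decreasing counters that collect the non-'.' cells into a list, which is then sorted and scanned once for an equal adjacent pair with an early return.
import Mathlib
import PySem

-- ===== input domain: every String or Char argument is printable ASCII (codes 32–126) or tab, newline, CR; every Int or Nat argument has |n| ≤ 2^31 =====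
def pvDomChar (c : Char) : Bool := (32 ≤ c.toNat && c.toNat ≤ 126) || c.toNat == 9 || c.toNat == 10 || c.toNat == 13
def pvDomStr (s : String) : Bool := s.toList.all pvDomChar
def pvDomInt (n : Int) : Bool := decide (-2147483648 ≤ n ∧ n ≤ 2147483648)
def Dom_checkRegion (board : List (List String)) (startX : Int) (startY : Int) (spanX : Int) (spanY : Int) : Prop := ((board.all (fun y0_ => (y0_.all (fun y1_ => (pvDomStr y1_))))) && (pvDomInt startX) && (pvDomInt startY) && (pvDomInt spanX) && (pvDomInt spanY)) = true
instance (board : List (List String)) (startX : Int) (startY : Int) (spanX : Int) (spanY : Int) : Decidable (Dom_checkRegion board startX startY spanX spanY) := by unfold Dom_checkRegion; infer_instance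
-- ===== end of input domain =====

-- B replaces A's for-range loops with counter-plus-set duplicate check by while-loops with
-- decreasing counters collecting the cells into a list, then a sort and a single early-return
-- scan for an equal adjacent pair (objective: alternative algorithm, same return value).

-- ===== PORT A =====
-- count the non-"." cells and collect them into a set; duplicates make the count exceed the set size
def checkRegion (board : List (List String)) (startX : Int) (startY : Int) (spanX : Int) (spanY : Int) : Bool :=
  let r :=
    (PySem.List.pyRange startY (startY + spanY) 1).foldl
      (fun st i =>
        (PySem.List.pyRange startX (startX + spanX) 1).foldl
          (fun st j =>
            if PySem.List.pyGetD (PySem.List.pyGetD board i []) j "." ≠ "." then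
              (st.1 + 1, PySem.Set.add st.2 (PySem.List.pyGetD (PySem.List.pyGetD board i []) j "."))
            else st)
          st)
      ((0 : Int), (PySem.Set.empty : PySem.Set String))
  r.1 == PySem.Set.len r.2

-- ===== PORT B =====
-- inner while loop: 'while cols > 0: v = board[i][j]; …; j += 1; cols -= 1'
def pvBInner (board : List (List String)) (i : Int) : Int → Nat → List String → List String
  | _, 0, vals => vals
  | j, cols+1, vals =>
      let v := PySem.List.pyGetD (PySem.List.pyGetD board i []) j "."
      pvBInner board i (j+1) cols (if v ≠ "." then vals ++ [v] else vals)

-- outer while loop: 'while rows > 0: …inner…; i += 1; rows -= 1'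
def pvBOuter (board : List (List String)) (startX spanX : Int) : Int → Nat → List String → List String
  | _, 0, vals => vals
  | i, rows+1, vals => pvBOuter board startX spanX (i+1) rows (pvBInner board i startX spanX.toNat vals)

-- 'prev = None; for v in sorted(vals): if v == prev: return False; prev = v' then 'return True'
def pvBScan : Option String → List String → Bool
  | _, [] => true
  | prev, v :: rest => if some v == prev then false else pvBScan (some v) rest

def checkRegion_alt (board : List (List String)) (startX : Int) (startY : Int) (spanX : Int) (spanY : Int) : Bool :=
  pvBScan none (PySem.List.sorted (pvBOuter board startX spanX startY spanY.toNat []) (fun x => x) false)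

-- ===== PRECONDITION & SPEC =====
-- Pre_ excludes exactly the inputs where Python's board[i][j] raises IndexError
-- (some visited row or column index out of range, negative indices counted from the end).
def Pre_checkRegion (board : List (List String)) (startX : Int) (startY : Int) (spanX : Int) (spanY : Int) : Prop :=
  spanY ≤ 0 ∨ spanX ≤ 0 ∨
    (-(board.length : Int) ≤ startY ∧ startY + spanY ≤ (board.length : Int) ∧
      ∀ i ∈ PySem.List.pyRange startY (startY + spanY) 1,
        -((PySem.List.pyGetD board i []).length : Int) ≤ startX ∧
          startX + spanX ≤ ((PySem.List.pyGetD board i []).length : Int))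
instance (board : List (List String)) (startX : Int) (startY : Int) (spanX : Int) (spanY : Int) : Decidable (Pre_checkRegion board startX startY spanX spanY) := by unfold Pre_checkRegion; infer_instance
def pvWitness_checkRegion : List (List String) × Int × Int × Int × Int := ([["1", "."], [".", "2"]], 0, 0, 2, 2)

def Spec_checkRegion (board : List (List String)) (startX : Int) (startY : Int) (spanX : Int) (spanY : Int) (out : Bool) : Prop := out = checkRegion_alt board startX startY spanX spanY
instance (board : List (List String)) (startX : Int) (startY : Int) (spanX : Int) (spanY : Int) (out : Bool) : Decidable (Spec_checkRegion board startX startY spanX spanY out) := by unfold Spec_checkRegion; infer_instance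

-- ===== CLAIM (what is proved, stated in full; the proofs are below) =====
def Claim_equal_checkRegion : Prop := ∀ (board : List (List String)) (startX : Int) (startY : Int) (spanX : Int) (spanY : Int), Dom_checkRegion board startX startY spanX spanY → Pre_checkRegion board startX startY spanX spanY → Spec_checkRegion board startX startY spanX spanY (checkRegion board startX startY spanX spanY)

-- ===== LEMMAS AND PROOFS =====

-- the list of non-"." cells of the region, in A's (and B's) visiting order
def pvRow (board : List (List String)) (startX spanX : Int) (i : Int) : List String :=
  (PySem.List.pyRange startX (startX + spanX) 1).filterMap (fun j =>
    if PySem.List.pyGetD (PySem.List.pyGetD board i []) j "." ≠ "." then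
      some (PySem.List.pyGetD (PySem.List.pyGetD board i []) j ".")
    else none)

def pvVals (board : List (List String)) (startX startY spanX spanY : Int) : List String :=
  (PySem.List.pyRange startY (startY + spanY) 1).flatMap (pvRow board startX spanX)

-- A's inner loop from state (n, s)
lemma pvInner (board : List (List String)) (i : Int) (js : List Int) :
    ∀ (n : Int) (s : PySem.Set String),
      js.foldl
        (fun st j =>
          if PySem.List.pyGetD (PySem.List.pyGetD board i []) j "." ≠ "." then
            (st.1 + 1, PySem.Set.add st.2 (PySem.List.pyGetD (PySem.List.pyGetD board i []) j "."))
          else st)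
        (n, s)
      = (n + (js.filterMap (fun j =>
          if PySem.List.pyGetD (PySem.List.pyGetD board i []) j "." ≠ "." then
            some (PySem.List.pyGetD (PySem.List.pyGetD board i []) j ".")
          else none)).length,
         (js.filterMap (fun j =>
          if PySem.List.pyGetD (PySem.List.pyGetD board i []) j "." ≠ "." then
            some (PySem.List.pyGetD (PySem.List.pyGetD board i []) j ".")
          else none)).foldl PySem.Set.add s) := by
  intro n s
  induction js generalizing n s with
  | nil => simp
  | cons j js ih =>
    simp only [List.foldl_cons, List.filterMap_cons]
    by_cases h : PySem.List.pyGetD (PySem.List.pyGetD board i []) j "." ≠ "."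
    · rw [if_pos h, if_pos h, ih]
      simp only [List.length_cons, List.foldl_cons, Prod.mk.injEq]
      exact ⟨by push_cast; ring, trivial⟩
    · rw [if_neg h, if_neg h, ih]

-- A's outer loop
lemma pvOuter (board : List (List String)) (startX spanX : Int) (is' : List Int) :
    ∀ (n : Int) (s : PySem.Set String),
      is'.foldl
        (fun st i =>
          (PySem.List.pyRange startX (startX + spanX) 1).foldl
            (fun st j =>
              if PySem.List.pyGetD (PySem.List.pyGetD board i []) j "." ≠ "." then
                (st.1 + 1, PySem.Set.add st.2 (PySem.List.pyGetD (PySem.List.pyGetD board i []) j "."))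
              else st)
            st)
        (n, s)
      = (n + (is'.flatMap (pvRow board startX spanX)).length,
         (is'.flatMap (pvRow board startX spanX)).foldl PySem.Set.add s) := by
  intro n s
  induction is' generalizing n s with
  | nil => simp
  | cons i rest ih =>
    simp only [List.foldl_cons, List.flatMap_cons]
    rw [pvInner board i _ n s, ih]
    rw [List.foldl_append, List.length_append]
    simp only [Prod.mk.injEq, pvRow]
    exact ⟨by push_cast; ring, trivial⟩

-- counting: the set built from xs over s reaches full size iff no duplicates land
lemma pvFoldlAdd (xs : List String) :
    ∀ s : List String, s.Nodup →
      (xs.foldl PySem.Set.add s).Nodup ∧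
      ((xs.foldl PySem.Set.add s).length = s.length + xs.length ↔
        xs.Nodup ∧ ∀ x ∈ xs, x ∉ s) ∧
      (xs.foldl PySem.Set.add s).length ≤ s.length + xs.length := by
  induction xs with
  | nil => simp
  | cons x xs ih =>
    intro s hs
    simp only [List.foldl_cons, List.length_cons]
    by_cases hx : x ∈ s
    · have hadd : PySem.Set.add s x = s := by simp [PySem.Set.add, hx]
      rw [hadd]
      obtain ⟨h1, h2, h3⟩ := ih s hs
      refine ⟨h1, ?_, by simpa using Nat.le_succ_of_le h3⟩
      constructor
      · intro he; omega
      · rintro ⟨-, hall⟩; exact absurd hx (hall x (by simp))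
    · have hadd : PySem.Set.add s x = s ++ [x] := by simp [PySem.Set.add, hx]
      rw [hadd]
      have hs' : (s ++ [x]).Nodup :=
        ((List.perm_append_singleton x s).nodup_iff).mpr (List.nodup_cons.mpr ⟨hx, hs⟩)
      obtain ⟨h1, h2, h3⟩ := ih (s ++ [x]) hs'
      have hlen : (s ++ [x]).length = s.length + 1 := by simp
      refine ⟨h1, ?_, by omega⟩
      rw [hlen] at h2
      constructor
      · intro he
        have := h2.mp (by omega)
        obtain ⟨hnd, hall⟩ := this
        refine ⟨List.nodup_cons.mpr ⟨?_, hnd⟩, ?_⟩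
        · intro hmem; exact (hall x hmem) (by simp)
        · intro y hy
          rcases List.mem_cons.mp hy with rfl | hy'
          · exact hx
          · intro hys; exact (hall y hy') (by simp [hys])
      · rintro ⟨hnd, hall⟩
        have hnd' := List.nodup_cons.mp hnd
        have : xs.Nodup ∧ ∀ y ∈ xs, y ∉ s ++ [x] := by
          refine ⟨hnd'.2, fun y hy => ?_⟩
          simp only [List.mem_append, List.mem_singleton]
          rintro (hys | rfl)
          · exact (hall y (by simp [hy])) hys
          · exact hnd'.1 hy
        have := h2.mpr this
        omega

lemma pvALen (vals : List String) :
    (((vals.length : Int)) == PySem.Set.len (vals.foldl PySem.Set.add PySem.Set.empty))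
      = decide vals.Nodup := by
  obtain ⟨-, h2, -⟩ := pvFoldlAdd vals [] List.nodup_nil
  simp only [List.length_nil, Nat.zero_add] at h2
  have hempty : (PySem.Set.empty : PySem.Set String) = [] := rfl
  rw [hempty, Bool.beq_eq_decide_eq]
  have hlen : PySem.Set.len (vals.foldl PySem.Set.add []) = ((vals.foldl PySem.Set.add []).length : Int) := by
    simp [PySem.Set.len]
  rw [hlen]
  refine decide_eq_decide.mpr ?_
  constructor
  · intro h
    exact (h2.mp (by exact_mod_cast h.symm)).1
  · intro h
    exact_mod_cast (h2.mpr ⟨h, by simp⟩).symm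

lemma pvAEq (board : List (List String)) (startX startY spanX spanY : Int) :
    checkRegion board startX startY spanX spanY
      = decide (pvVals board startX startY spanX spanY).Nodup := by
  unfold checkRegion
  rw [pvOuter board startX spanX _ 0 PySem.Set.empty]
  simp only [Int.zero_add]
  exact pvALen (pvVals board startX startY spanX spanY)

-- B's inner while loop collects the row suffix starting at j (cols iterations)
lemma pvBInnerEq (board : List (List String)) (i : Int) :
    ∀ (n : Nat) (j : Int) (vals : List String),
      pvBInner board i j n vals
        = vals ++ (PySem.List.pyRange j (j + n) 1).filterMap (fun j' =>
            if PySem.List.pyGetD (PySem.List.pyGetD board i []) j' "." ≠ "." then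
              some (PySem.List.pyGetD (PySem.List.pyGetD board i []) j' ".")
            else none) := by
  intro n
  induction n with
  | zero =>
    intro j vals
    rw [pvBInner, PySem.List.pyRange_one_eq_nil (by simp)]
    simp
  | succ m ih =>
    intro j vals
    rw [pvBInner, PySem.List.pyRange_one_cons (by push_cast; omega), ih]
    have harith : j + 1 + (m : Int) = j + ((m : Nat) + 1 : Nat) := by push_cast; ring
    rw [harith]
    simp only [List.filterMap_cons]
    by_cases h : PySem.List.pyGetD (PySem.List.pyGetD board i []) j "." ≠ "."
    · rw [if_pos h, if_pos h, List.append_assoc]; rfl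
    · rw [if_neg h, if_neg h]

-- the inner loop produces exactly A's pvRow of that row
lemma pvBInnerRow (board : List (List String)) (startX spanX : Int) (i : Int) (vals : List String) :
    pvBInner board i startX spanX.toNat vals = vals ++ pvRow board startX spanX i := by
  rw [pvBInnerEq, pvRow]
  by_cases h : 0 < spanX
  · rw [Int.toNat_of_nonneg (le_of_lt h)]
  · rw [Int.toNat_of_nonpos (by omega)]
    rw [PySem.List.pyRange_one_eq_nil (by omega), PySem.List.pyRange_one_eq_nil (by omega)]

-- B's outer while loop collects pvVals
lemma pvBOuterEq (board : List (List String)) (startX spanX : Int) :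
    ∀ (n : Nat) (i : Int) (vals : List String),
      pvBOuter board startX spanX i n vals
        = vals ++ (PySem.List.pyRange i (i + n) 1).flatMap (pvRow board startX spanX) := by
  intro n
  induction n with
  | zero =>
    intro i vals
    rw [pvBOuter, PySem.List.pyRange_one_eq_nil (by simp)]
    simp
  | succ m ih =>
    intro i vals
    rw [pvBOuter, PySem.List.pyRange_one_cons (by push_cast; omega), ih, pvBInnerRow]
    have harith : i + 1 + (m : Int) = i + ((m : Nat) + 1 : Nat) := by push_cast; ring
    rw [harith, List.flatMap_cons, List.append_assoc]

lemma pvBVals (board : List (List String)) (startX startY spanX spanY : Int) :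
    pvBOuter board startX spanX startY spanY.toNat [] = pvVals board startX startY spanX spanY := by
  rw [pvBOuterEq, pvVals, List.nil_append]
  by_cases h : 0 < spanY
  · rw [Int.toNat_of_nonneg (le_of_lt h)]
  · rw [Int.toNat_of_nonpos (by omega)]
    rw [PySem.List.pyRange_one_eq_nil (by omega), PySem.List.pyRange_one_eq_nil (by omega)]

-- the early-return scan sees an equal adjacent pair iff the chain of ≠ breaks
lemma pvBScanSome (l : List String) :
    ∀ a : String, pvBScan (some a) l = true ↔ (a :: l).IsChain (· ≠ ·) := by
  induction l with
  | nil => intro a; simp [pvBScan]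
  | cons v rest ih =>
    intro a
    rw [pvBScan, List.isChain_cons_cons]
    by_cases h : v = a
    · subst h; simp
    · have hbeq : (some v == some a) = false := by
        simp [h]
      rw [hbeq, if_neg (by simp)]
      rw [ih v]
      simp [Ne, eq_comm, h]

lemma pvBScanNone (l : List String) :
    pvBScan none l = true ↔ l.IsChain (· ≠ ·) := by
  cases l with
  | nil => simp [pvBScan]
  | cons v rest =>
    rw [pvBScan, if_neg (by simp)]
    rw [pvBScanSome rest v]

-- adjacent ≤ together with adjacent ≠ gives adjacent <
lemma pvChainLt : ∀ (l : List String), l.IsChain (· ≤ ·) → l.IsChain (· ≠ ·) → l.IsChain (· < ·)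
  | [], _, _ => List.IsChain.nil
  | [a], _, _ => List.isChain_singleton a
  | a :: b :: t, hle, hne => by
    rw [List.isChain_cons_cons] at *
    exact ⟨lt_of_le_of_ne hle.1 hne.1, pvChainLt (b :: t) hle.2 hne.2⟩

-- on a ≤-sorted list, no equal adjacent pair ↔ no duplicates at all
lemma pvSortedChain (l : List String) (h : l.Pairwise (· ≤ ·)) :
    l.IsChain (· ≠ ·) ↔ l.Nodup := by
  constructor
  · intro hc
    have hle : l.IsChain (· ≤ ·) := h.isChain
    have hlt : l.IsChain (· < ·) := pvChainLt l hle hc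
    exact (List.isChain_iff_pairwise.mp hlt).imp ne_of_lt
  · intro hnd
    exact List.Pairwise.isChain hnd

lemma pvAltEq (board : List (List String)) (startX startY spanX spanY : Int) :
    checkRegion_alt board startX startY spanX spanY
      = decide (pvVals board startX startY spanX spanY).Nodup := by
  unfold checkRegion_alt
  rw [pvBVals]
  rw [Bool.eq_iff_iff, pvBScanNone, decide_eq_true_iff]
  rw [pvSortedChain _ (by simpa using PySem.List.sorted_pairwise (pvVals board startX startY spanX spanY) (fun x => x))]
  exact (PySem.List.sorted_perm (pvVals board startX startY spanX spanY) (fun x => x) false).nodup_iff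

-- ===== VERDICT (by name: the statement is the Claim_ definition above) =====
theorem checkRegion_spec : Claim_equal_checkRegion := by
  intro board startX startY spanX spanY _ _
  unfold Spec_checkRegion
  rw [pvAEq, pvAltEq]
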